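-- pv_equiv track=rewrite | github.com/Arsen1302/Code-copy-detector | TestData/solutions/problem_1420_3.py | solution_1420_3
-- ===== SOURCE A (Python) =====
-- def solution_1420_3(s: str, rows: int) -> str:
--     if not s: return ""
--     n=len(s)
--     cols=n//rows
--     arr=[" "]*n
--     for i in range(rows):
--         for j in range(cols):
--             if i>j: continue
--             arr[i+rows*(j-i)]=s[i*cols+j]
--     i=n-1
--     while i>=0 and arr[i]==" ":
--         i-=1
--     return ''.join(arr[:i+1])
-- ===== SOURCE B (Python) =====
-- def solution_1420_3(s: str, rows: int) -> str:
--     # Inverse index map: one pass over output positions instead of A's double loop + scatter writes.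
--     if not s:
--         return ""
--     n = len(s)
--     cols = n // rows
--     if rows <= 0 or cols <= 0:
--         return ""
--     arr = []
--     for p in range(n):
--         i = p % rows
--         j = p // rows + i
--         arr.append(s[i * cols + j] if j < cols else " ")
--     while arr and arr[-1] == " ":
--         arr.pop()
--     return "".join(arr)
-- ===== Notes on version B (the rewrite author's own statement) =====
-- stated objective: alternative
-- what changed: B inverts A's index map: instead of A's double loop over (row,col) pairs scattering characters into a pre-allocated buffer, B makes a single pass over output positions p, computing the source index directly via i=p%rows, j=p//rows+i, then trims trailing spaces.
import Mathlib
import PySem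

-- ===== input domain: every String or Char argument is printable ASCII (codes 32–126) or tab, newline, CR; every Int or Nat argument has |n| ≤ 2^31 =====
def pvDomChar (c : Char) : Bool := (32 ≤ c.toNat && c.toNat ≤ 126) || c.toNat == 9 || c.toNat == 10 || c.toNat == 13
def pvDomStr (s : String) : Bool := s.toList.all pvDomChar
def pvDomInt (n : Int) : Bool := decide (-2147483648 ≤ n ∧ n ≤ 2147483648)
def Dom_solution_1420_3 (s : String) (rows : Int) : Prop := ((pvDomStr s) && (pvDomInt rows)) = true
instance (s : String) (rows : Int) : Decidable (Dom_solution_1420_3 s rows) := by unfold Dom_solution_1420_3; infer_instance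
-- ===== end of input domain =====

-- B replaces A's double (row,col) scatter loop by a single gather pass over output positions (inverse index map); return values proved equal on Pre_ (A raises ZeroDivisionError on rows = 0 with nonempty s, excluded).


-- ===== PORT A =====
-- the while loop 'i = n-1; while i >= 0 and arr[i] == " ": i -= 1'
def trimLoop (arr : List Char) (i : Int) : Int :=
  if h : 0 ≤ i ∧ (PySem.List.pyGet? arr i).getD '?' == ' ' then trimLoop arr (i - 1) else i
termination_by (i + 1).toNat
decreasing_by omega

def solution_1420_3 (s : String) (rows : Int) : String :=
  let cs := s.toList
  if cs = [] then "" else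
  let n : Int := cs.length
  let cols := PySem.Int.floordiv n rows
  let arr0 : List Char := List.replicate cs.length ' '
  let arr := (PySem.List.pyRange 0 rows 1).foldl (fun a i =>
    (PySem.List.pyRange 0 cols 1).foldl (fun a j =>
      if i > j then a
      else PySem.List.pySetD a (i + rows * (j - i)) ((PySem.List.pyGet? cs (i * cols + j)).getD ' ')) a) arr0
  let iEnd := trimLoop arr (n - 1)
  String.ofList (PySem.List.slice arr none (some (iEnd + 1)))

-- ===== PORT B =====
-- the while loop 'while arr and arr[-1] == " ": arr.pop()' (drops the trailing run of spaces)
def popTrail (arr : List Char) : List Char :=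
  (arr.reverse.dropWhile (fun c => c == ' ')).reverse

def solution_1420_3_alt (s : String) (rows : Int) : String :=
  let cs := s.toList
  if cs = [] then "" else
  let n : Int := cs.length
  let cols := PySem.Int.floordiv n rows
  if rows ≤ 0 ∨ cols ≤ 0 then "" else
  let arr := (PySem.List.pyRange 0 n 1).map (fun p =>
    let i := PySem.Int.mod p rows
    let j := PySem.Int.floordiv p rows + i
    if j < cols then (PySem.List.pyGet? cs (i * cols + j)).getD ' ' else ' ')
  String.ofList (popTrail arr)

-- ===== PRECONDITION & SPEC =====
-- Pre_ excludes exactly the inputs where A raises ZeroDivisionError (nonempty s with rows = 0); B raises there too.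
def Pre_solution_1420_3 (s : String) (rows : Int) : Prop := s = "" ∨ rows ≠ 0
instance (s : String) (rows : Int) : Decidable (Pre_solution_1420_3 s rows) := by
  unfold Pre_solution_1420_3; infer_instance

def pvWitness_solution_1420_3 : String × Int := ("abcdef", 2)

def Spec_solution_1420_3 (s : String) (rows : Int) (out : String) : Prop := out = solution_1420_3_alt s rows
instance (s : String) (rows : Int) (out : String) : Decidable (Spec_solution_1420_3 s rows out) := by
  unfold Spec_solution_1420_3; infer_instance

-- ===== CLAIM (what is proved, stated in full; the proofs are below) =====
def Claim_equal_solution_1420_3 : Prop := ∀ (s : String) (rows : Int), Dom_solution_1420_3 s rows → Pre_solution_1420_3 s rows → Spec_solution_1420_3 s rows (solution_1420_3 s rows)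

-- ===== LEMMAS AND PROOFS =====

theorem trimLoop_step_pos (arr : List Char) (i : Int)
    (h : 0 ≤ i ∧ (PySem.List.pyGet? arr i).getD '?' == ' ') :
    trimLoop arr i = trimLoop arr (i - 1) := by
  conv_lhs => rw [trimLoop]
  exact dif_pos h

theorem trimLoop_step_neg (arr : List Char) (i : Int)
    (h : ¬ (0 ≤ i ∧ (PySem.List.pyGet? arr i).getD '?' == ' ')) :
    trimLoop arr i = i := by
  conv_lhs => rw [trimLoop]
  exact dif_neg h

-- reading an index below xs.length ignores an appended element
theorem pvGet_append (xs : List Char) (c : Char) (i : Int) (h0 : 0 ≤ i) (h1 : i < (xs.length : Int)) :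
    PySem.List.pyGet? (xs ++ [c]) i = PySem.List.pyGet? xs i := by
  obtain ⟨m, rfl⟩ : ∃ m : Nat, i = (m : Int) := ⟨i.toNat, by omega⟩
  rw [PySem.List.pyGet?_natCast, PySem.List.pyGet?_natCast,
    List.getElem?_append_left (by exact_mod_cast h1)]

theorem trimLoop_le (arr : List Char) (i : Int) : trimLoop arr i ≤ i := by
  induction i using trimLoop.induct (arr := arr) with
  | case1 i h ih => rw [trimLoop_step_pos arr i h]; omega
  | case2 i h => rw [trimLoop_step_neg arr i h]

theorem neg_one_le_trimLoop (arr : List Char) (i : Int) : -1 ≤ i → -1 ≤ trimLoop arr i := by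
  induction i using trimLoop.induct (arr := arr) with
  | case1 i h ih => intro _; rw [trimLoop_step_pos arr i h]; exact ih (by omega)
  | case2 i h => intro h'; rw [trimLoop_step_neg arr i h]; exact h'

theorem trimLoop_append (xs : List Char) (c : Char) :
    ∀ (k : Nat) (i : Int), (i + 1).toNat ≤ k → i < (xs.length : Int) →
      trimLoop (xs ++ [c]) i = trimLoop xs i := by
  intro k
  induction k with
  | zero =>
    intro i hk hi
    rw [trimLoop_step_neg _ _ (fun h => absurd h.1 (by omega)),
      trimLoop_step_neg _ _ (fun h => absurd h.1 (by omega))]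
  | succ k ih =>
    intro i hk hi
    by_cases h0 : 0 ≤ i
    · have hgg := pvGet_append xs c i h0 hi
      by_cases hc : 0 ≤ i ∧ (PySem.List.pyGet? xs i).getD '?' == ' '
      · rw [trimLoop_step_pos (xs ++ [c]) i (by rw [hgg]; exact hc),
          trimLoop_step_pos xs i hc]
        exact ih (i - 1) (by omega) (by omega)
      · rw [trimLoop_step_neg (xs ++ [c]) i (by rw [hgg]; exact hc),
          trimLoop_step_neg xs i hc]
    · rw [trimLoop_step_neg _ _ (fun h => absurd h.1 h0),
        trimLoop_step_neg _ _ (fun h => absurd h.1 h0)]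

theorem trim_take (xs : List Char) :
    xs.take ((trimLoop xs ((xs.length : Int) - 1) + 1).toNat) = popTrail xs := by
  induction xs using List.reverseRecOn with
  | nil =>
    rw [show ((([] : List Char).length : Int) - 1) = -1 by simp,
      trimLoop_step_neg _ _ (fun h => absurd h.1 (by omega))]
    simp [popTrail]
  | append_singleton xs c ih =>
    have hlen : (((xs ++ [c]).length : Int) - 1) = (xs.length : Int) := by
      simp
    rw [hlen]
    have hget : PySem.List.pyGet? (xs ++ [c]) (xs.length : Int) = some c := by
      rw [PySem.List.pyGet?_natCast]; simp
    by_cases hc : c = ' '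
    · subst hc
      have hcond : 0 ≤ (xs.length : Int) ∧
          (PySem.List.pyGet? (xs ++ [' ']) (xs.length : Int)).getD '?' == ' ' := by
        refine ⟨by omega, ?_⟩
        rw [hget]; rfl
      rw [trimLoop_step_pos _ _ hcond,
        trimLoop_append xs ' ' (xs.length + 1) ((xs.length : Int) - 1) (by omega) (by omega)]
      have hle := trimLoop_le xs ((xs.length : Int) - 1)
      have hge := neg_one_le_trimLoop xs ((xs.length : Int) - 1) (by omega)
      rw [List.take_append_of_le_length (by omega), ih]
      simp [popTrail]
    · have hcond : ¬ (0 ≤ (xs.length : Int) ∧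
          (PySem.List.pyGet? (xs ++ [c]) (xs.length : Int)).getD '?' == ' ') := by
        rw [hget]
        simp only [Option.getD_some]
        intro h
        exact hc (by simpa using h.2)
      rw [trimLoop_step_neg _ _ hcond,
        show ((xs.length : Int) + 1).toNat = (xs ++ [c]).length by simp,
        List.take_length]
      have hb : (c == ' ') = false := by simpa using hc
      simp [popTrail, hb]

theorem trim_slice (xs : List Char) :
    PySem.List.slice xs none (some (trimLoop xs ((xs.length : Int) - 1) + 1)) = popTrail xs := by
  have hge := neg_one_le_trimLoop xs ((xs.length : Int) - 1) (by omega)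
  rw [PySem.List.slice_to xs (by omega), trim_take]

theorem popTrail_replicate (n : Nat) : popTrail (List.replicate n ' ') = [] := by
  simp [popTrail]

-- 'if i > j: continue' = fold over the filtered list
theorem foldl_ite_skip (i : Int) (f : List Char → Int → List Char) :
    ∀ (l : List Int) (a : List Char),
      l.foldl (fun a j => if i > j then a else f a j) a
        = (l.filter (fun j => decide (i ≤ j))).foldl f a := by
  intro l
  induction l with
  | nil => intro a; rfl
  | cons x xs ih =>
    intro a
    simp only [List.foldl_cons, List.filter_cons]
    by_cases h : i > x
    · rw [if_pos h, show (decide (i ≤ x)) = false by simp; omega]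
      exact ih a
    · rw [if_neg h, show (decide (i ≤ x)) = true by simp; omega]
      exact ih (f a x)

-- a nested fold is a fold over the flattened pair list
theorem foldl_double (f : List Char → Int × Int → List Char) (g : Int → List Int) :
    ∀ (outer : List Int) (a : List Char),
      outer.foldl (fun a i => (g i).foldl (fun a j => f a (i, j)) a) a
        = (outer.flatMap (fun i => (g i).map (fun j => (i, j)))).foldl f a := by
  intro outer
  induction outer with
  | nil => intro a; rfl
  | cons x xs ih =>
    intro a
    simp only [List.foldl_cons, List.flatMap_cons, List.foldl_append, List.foldl_map]
    exact ih _

theorem foldl_pySetD_getElem? (key : Int × Int → Int) (val : Int × Int → Char) :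
    ∀ (pairs : List (Int × Int)) (a : List Char) (p : Nat),
      (∀ e ∈ pairs, 0 ≤ key e ∧ key e < (a.length : Int)) →
      (pairs.foldl (fun a e => PySem.List.pySetD a (key e) (val e)) a)[p]? =
        match pairs.reverse.find? (fun e => key e == (p : Int)) with
        | some e => some (val e)
        | none => a[p]? := by
  intro pairs
  induction pairs with
  | nil => intro a p _; rfl
  | cons e rest ih =>
    intro a p h
    have hk := h e List.mem_cons_self
    have hlen : (PySem.List.pySetD a (key e) (val e)).length = a.length :=
      PySem.List.length_pySetD a (key e) (val e)
    simp only [List.foldl_cons]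
    rw [ih (PySem.List.pySetD a (key e) (val e)) p
      (by intro e' he'; rw [hlen]; exact h e' (List.mem_cons_of_mem _ he'))]
    rw [show (e :: rest).reverse = rest.reverse ++ [e] by simp, List.find?_append]
    cases hf : rest.reverse.find? (fun e' => key e' == (p : Int)) with
    | some x => simp
    | none =>
      simp only [Option.none_or]
      rw [PySem.List.pySetD_of_nonneg a (val e) hk.1]
      by_cases hkey : key e = (p : Int)
      · have h1 : (key e).toNat = p := by omega
        have h2 : p < a.length := by omega
        have hb : (key e == (p : Int)) = true := by simpa using hkey
        simp [hb, h1, h2]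
      · have h1 : (key e).toNat ≠ p := by omega
        have hb : (key e == (p : Int)) = false := by simpa using hkey
        simp [hb, h1]

theorem find?_reverse_of_unique {A : Type} (l : List A) (pred : A → Bool)
    (h : ∀ a ∈ l, ∀ b ∈ l, pred a → pred b → a = b) :
    l.reverse.find? pred = l.find? pred := by
  cases hf : l.find? pred with
  | none =>
    rw [List.find?_eq_none] at hf ⊢
    intro x hx; exact hf x (List.mem_reverse.mp hx)
  | some x =>
    have hx : x ∈ l := List.mem_of_find?_eq_some hf
    have hpx : pred x := List.find?_some hf
    cases hg : l.reverse.find? pred with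
    | none =>
      rw [List.find?_eq_none] at hg
      exact absurd hpx (by simpa using hg x (by simp [hx]))
    | some y =>
      have hy : y ∈ l := by simpa using List.mem_of_find?_eq_some hg
      have hpy : pred y := List.find?_some hg
      rw [h y hy x hx hpy hpx]

theorem find?_eq_some_unique {A : Type} (pred : A → Bool) (e : A) :
    ∀ (l : List A), e ∈ l → pred e = true →
      (∀ a ∈ l, pred a = true → a = e) → l.find? pred = some e := by
  intro l
  induction l with
  | nil => intro he; cases he
  | cons x xs ih =>
    intro he hp uniq
    by_cases hx : pred x = true
    · rw [show (x :: xs).find? pred = some x by simp [hx],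
        uniq x List.mem_cons_self hx]
    · rw [show (x :: xs).find? pred = xs.find? pred by
        simp [show pred x = false by simpa using hx]]
      have hex : e ∈ xs := by
        cases List.mem_cons.mp he with
        | inl h => exact absurd (h ▸ hp) hx
        | inr h => exact h
      exact ih hex hp (fun a ha hpa => uniq a (List.mem_cons_of_mem _ ha) hpa)

-- the scatter index map is inverted by (p % rows, p / rows + p % rows)
theorem key_inverse (rows p i j : Int) (hr : 0 < rows) (hi : 0 ≤ i) (hi2 : i < rows)
    (_hij : i ≤ j) (hk : i + rows * (j - i) = p) :
    i = p % rows ∧ j = p / rows + p % rows := by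
  have h1 : p % rows = i := by
    rw [← hk, Int.add_mul_emod_self_left, Int.emod_eq_of_lt hi hi2]
  have h2 : p / rows = j - i := by
    rw [← hk, Int.add_mul_ediv_left _ _ (by omega : rows ≠ 0),
      Int.ediv_eq_zero_of_lt hi hi2]
    omega
  omega

theorem main_eq (cs : List Char) (rows : Int) (hr : 0 < rows) :
    (PySem.List.pyRange 0 rows 1).foldl (fun a i =>
      (PySem.List.pyRange 0 (PySem.Int.floordiv (cs.length : Int) rows) 1).foldl (fun a j =>
        if i > j then a
        else PySem.List.pySetD a (i + rows * (j - i))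
          ((PySem.List.pyGet? cs (i * (PySem.Int.floordiv (cs.length : Int) rows) + j)).getD ' ')) a)
      (List.replicate cs.length ' ')
    = (PySem.List.pyRange 0 (cs.length : Int) 1).map (fun p =>
        let i := PySem.Int.mod p rows
        let j := PySem.Int.floordiv p rows + i
        if j < PySem.Int.floordiv (cs.length : Int) rows
        then (PySem.List.pyGet? cs (i * (PySem.Int.floordiv (cs.length : Int) rows) + j)).getD ' '
        else ' ') := by
  have hrne : rows ≠ 0 := by omega
  have hN0 : (0 : Int) ≤ (cs.length : Int) := by positivity
  rw [PySem.Int.floordiv_eq_ediv_of_pos hr]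
  set N : Int := (cs.length : Int) with hN
  set cols : Int := N / rows with hcols
  have hcols0 : 0 ≤ cols := Int.ediv_nonneg hN0 (by omega)
  have hcolsN : cols * rows ≤ N := by
    rw [hcols]
    exact Int.ediv_mul_le N (by omega)
  have step1 : ∀ (a : List Char) (i : Int),
      (PySem.List.pyRange 0 cols 1).foldl (fun a j =>
        if i > j then a
        else PySem.List.pySetD a (i + rows * (j - i))
          ((PySem.List.pyGet? cs (i * cols + j)).getD ' ')) a
      = ((PySem.List.pyRange 0 cols 1).filter (fun j => decide (i ≤ j))).foldl
          (fun a j => PySem.List.pySetD a (i + rows * (j - i))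
            ((PySem.List.pyGet? cs (i * cols + j)).getD ' ')) a := by
    intro a i
    exact foldl_ite_skip i _ _ a
  simp only [step1]
  set key : Int × Int → Int := fun e => e.1 + rows * (e.2 - e.1) with hkey
  set val : Int × Int → Char := fun e => (PySem.List.pyGet? cs (e.1 * cols + e.2)).getD ' ' with hval
  set pairs : List (Int × Int) := (PySem.List.pyRange 0 rows 1).flatMap
    (fun i => ((PySem.List.pyRange 0 cols 1).filter (fun j => decide (i ≤ j))).map
      (fun j => (i, j))) with hpairs
  have step2 :
      (PySem.List.pyRange 0 rows 1).foldl (fun a i =>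
        ((PySem.List.pyRange 0 cols 1).filter (fun j => decide (i ≤ j))).foldl
          (fun a j => PySem.List.pySetD a (i + rows * (j - i))
            ((PySem.List.pyGet? cs (i * cols + j)).getD ' ')) a)
        (List.replicate cs.length ' ')
      = pairs.foldl (fun a e => PySem.List.pySetD a (key e) (val e))
          (List.replicate cs.length ' ') := by
    rw [hpairs, ← foldl_double (fun a e => PySem.List.pySetD a (key e) (val e))]
  rw [step2]
  have hmem : ∀ e : Int × Int, e ∈ pairs ↔
      0 ≤ e.1 ∧ e.1 < rows ∧ 0 ≤ e.2 ∧ e.2 < cols ∧ e.1 ≤ e.2 := by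
    intro e
    rw [hpairs]
    simp only [List.mem_flatMap, List.mem_map, List.mem_filter,
      PySem.List.mem_pyRange_one]
    constructor
    · rintro ⟨i, ⟨hi0, hi1⟩, j, ⟨⟨hj0, hj1⟩, hij⟩, rfl⟩
      simp at hij ⊢
      omega
    · rintro ⟨h1, h2, h3, h4, h5⟩
      exact ⟨e.1, ⟨h1, h2⟩, e.2, ⟨⟨h3, h4⟩, by simpa using h5⟩, rfl⟩
  have hkb : ∀ e ∈ pairs, 0 ≤ key e ∧ key e < (cs.length : Int) := by
    intro e he
    obtain ⟨h1, h2, h3, h4, h5⟩ := (hmem e).mp he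
    constructor
    · have hmn : 0 ≤ rows * (e.2 - e.1) := mul_nonneg (by omega) (by omega)
      simp only [hkey]; omega
    · have hb1 : rows * e.2 ≤ rows * (cols - 1) :=
        mul_le_mul_of_nonneg_left (by omega) (by omega)
      have hkk : key e = rows * e.2 + e.1 * (1 - rows) := by simp only [hkey]; ring
      have hb2 : e.1 * (1 - rows) ≤ 0 := mul_nonpos_of_nonneg_of_nonpos (by omega) (by omega)
      rw [← hN]
      nlinarith
  have huniq : ∀ (p : Nat), ∀ a ∈ pairs, ∀ b ∈ pairs,
      (key a == (p : Int)) → (key b == (p : Int)) → a = b := by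
    intro p a ha b hb hpa hpb
    obtain ⟨a1, a2, a3, a4, a5⟩ := (hmem a).mp ha
    obtain ⟨b1, b2, b3, b4, b5⟩ := (hmem b).mp hb
    have hka : key a = (p : Int) := by simpa using hpa
    have hkb' : key b = (p : Int) := by simpa using hpb
    obtain ⟨ha1, ha2⟩ := key_inverse rows (p : Int) a.1 a.2 hr a1 a2 a5 hka
    obtain ⟨hb1', hb2'⟩ := key_inverse rows (p : Int) b.1 b.2 hr b1 b2 b5 hkb'
    have : a.1 = b.1 ∧ a.2 = b.2 := by omega
    exact Prod.ext this.1 this.2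
  apply List.ext_getElem?
  intro p
  rw [foldl_pySetD_getElem? key val pairs _ p (by simpa using hkb)]
  rw [find?_reverse_of_unique pairs _ (huniq p)]
  have hrhs : ((PySem.List.pyRange 0 N 1).map (fun q =>
        let i := PySem.Int.mod q rows
        let j := PySem.Int.floordiv q rows + i
        if j < cols then (PySem.List.pyGet? cs (i * cols + j)).getD ' ' else ' '))[p]?
      = if p < cs.length then
          some (if (p : Int) / rows + (p : Int) % rows < cols
                then (PySem.List.pyGet? cs (((p : Int) % rows) * cols + ((p : Int) / rows + (p : Int) % rows))).getD ' '
                else ' ')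
        else none := by
    rw [List.getElem?_map, PySem.List.pyRange_one, List.getElem?_map]
    by_cases h : p < cs.length
    · rw [List.getElem?_range (by omega : p < (N - 0).toNat)]
      simp only [Option.map_some, if_pos h, zero_add]
      rw [PySem.Int.mod_eq_emod_of_pos hr, PySem.Int.floordiv_eq_ediv_of_pos hr]
    · rw [List.getElem?_eq_none (by simp [hN]; omega)]
      simp [h]
  rw [hrhs]
  by_cases hp : p < cs.length
  · rw [if_pos hp]
    have hp0 : (0 : Int) ≤ (p : Int) := by positivity
    set ip : Int := (p : Int) % rows with hip
    set jp : Int := (p : Int) / rows + ip with hjp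
    have hipb : 0 ≤ ip ∧ ip < rows := ⟨Int.emod_nonneg _ hrne, Int.emod_lt_of_pos _ hr⟩
    have hqp : 0 ≤ (p : Int) / rows := Int.ediv_nonneg hp0 (by omega)
    have hkeyp : key (ip, jp) = (p : Int) := by
      simp only [hkey, hjp]
      have := Int.mul_ediv_add_emod (p : Int) rows
      ring_nf
      omega
    by_cases hj : jp < cols
    · rw [find?_eq_some_unique _ (ip, jp) pairs
        ((hmem (ip, jp)).mpr ⟨hipb.1, hipb.2, by omega, hj, by omega⟩)
        (by simpa using hkeyp)
        (fun a ha hpa => huniq p a ha (ip, jp) ((hmem (ip, jp)).mpr ⟨hipb.1, hipb.2, by omega, hj, by omega⟩) hpa (by simpa using hkeyp))]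
      rw [if_pos hj]
    · have hnone : pairs.find? (fun e => key e == (p : Int)) = none := by
        rw [List.find?_eq_none]
        intro a ha
        obtain ⟨a1, a2, a3, a4, a5⟩ := (hmem a).mp ha
        simp only [beq_iff_eq]
        intro hka
        obtain ⟨e1, e2⟩ := key_inverse rows (p : Int) a.1 a.2 hr a1 a2 a5 hka
        omega
      rw [hnone, if_neg hj]
      simp [hp]
  · rw [if_neg hp]
    have hnone : pairs.find? (fun e => key e == (p : Int)) = none := by
      rw [List.find?_eq_none]
      intro a ha
      simp only [beq_iff_eq]
      intro hka
      have := (hkb a ha).2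
      omega
    rw [hnone]
    simp [List.getElem?_replicate]
    omega

-- ===== VERDICT (by name: the statement is the Claim_ definition above) =====
theorem solution_1420_3_spec : Claim_equal_solution_1420_3 := by
  intro s rows _ hpre
  unfold Spec_solution_1420_3 solution_1420_3 solution_1420_3_alt
  by_cases hnil : s.toList = []
  · simp [hnil]
  · simp only [if_neg hnil]
    have hsne : s ≠ "" := fun h => hnil (by simp [h])
    have hrne : rows ≠ 0 := hpre.resolve_left hsne
    by_cases hr : 0 < rows
    · have hcols0 : 0 ≤ PySem.Int.floordiv (s.toList.length : Int) rows := by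
        rw [PySem.Int.floordiv_eq_ediv_of_pos hr]
        exact Int.ediv_nonneg (by positivity) (by omega)
      rw [main_eq s.toList rows hr]
      set L := (PySem.List.pyRange 0 (s.toList.length : Int) 1).map (fun p =>
        let i := PySem.Int.mod p rows
        let j := PySem.Int.floordiv p rows + i
        if j < PySem.Int.floordiv (s.toList.length : Int) rows
        then (PySem.List.pyGet? s.toList (i * (PySem.Int.floordiv (s.toList.length : Int) rows) + j)).getD ' '
        else ' ') with hL
      have hLlen : (L.length : Int) = (s.toList.length : Int) := by
        rw [hL, List.length_map, PySem.List.length_pyRange_one]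
        omega
      by_cases hcp : 0 < PySem.Int.floordiv (s.toList.length : Int) rows
      · rw [if_neg (by omega : ¬ (rows ≤ 0 ∨ PySem.Int.floordiv (s.toList.length : Int) rows ≤ 0))]
        rw [show (s.toList.length : Int) - 1 = (L.length : Int) - 1 by omega, trim_slice L]
      · -- cols = 0: every output cell is a space, so A trims everything; B returns "" directly
        rw [if_pos (by omega)]
        have hLrep : L = List.replicate s.toList.length ' ' := by
          rw [hL]
          have hlenr : (PySem.List.pyRange 0 (s.toList.length : Int) 1).length
              = s.toList.length := by
            rw [PySem.List.length_pyRange_one]; omega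
          rw [show List.replicate s.toList.length ' '
              = (PySem.List.pyRange 0 (s.toList.length : Int) 1).map (fun _ => ' ') by
            rw [List.map_const', hlenr]]
          apply List.map_congr_left
          intro q hq
          rw [PySem.List.mem_pyRange_one] at hq
          have : ¬ (PySem.Int.floordiv q rows + PySem.Int.mod q rows
              < PySem.Int.floordiv (s.toList.length : Int) rows) := by
            rw [PySem.Int.floordiv_eq_ediv_of_pos hr, PySem.Int.mod_eq_emod_of_pos hr]
            have h1 : 0 ≤ q / rows := Int.ediv_nonneg (by omega) (by omega)
            have h2 : 0 ≤ q % rows := Int.emod_nonneg _ (by omega)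
            omega
          simp only [if_neg this]
        rw [show (s.toList.length : Int) - 1 = (L.length : Int) - 1 by omega, trim_slice L,
          hLrep, popTrail_replicate]
    · -- rows < 0: A's outer range is empty, the buffer stays all spaces, the trim removes everything
      have hrneg : rows < 0 := by omega
      rw [if_pos (Or.inl (by omega))]
      rw [PySem.List.pyRange_one_eq_nil (by omega : rows ≤ 0)]
      simp only [List.foldl_nil]
      rw [show (s.toList.length : Int) - 1 = ((List.replicate s.toList.length ' ').length : Int) - 1 by simp,
        trim_slice, popTrail_replicate]
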